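-- pv_equiv track=rewrite | github.com/restlogic/mercurius | naming_convert.py | api_path_to_api_method_name
-- ===== SOURCE A (Python) =====
-- def api_path_to_api_method_name(api_path):
--     split_vec = api_path.split('/')
--     if split_vec[0] == '':
--         split_vec = split_vec[1:]
--
--     def canonical_words_method_name(i):
--         r = []
--         for j in i:
--             j = j.replace(
--                 '-', '_').replace('{', '').replace('}', '').replace('.', '')
--             r += [j]
--         return '_'.join(r)
--
--     method_name = canonical_words_method_name(split_vec)
--
--     return method_name
-- ===== SOURCE B (Python) =====
-- _TABLE = str.maketrans({'-': '_', '/': '_', '{': None, '}': None, '.': None})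
--
--
-- def api_path_to_api_method_name(api_path):
--     if api_path.startswith('/'):
--         api_path = api_path[1:]
--     return api_path.translate(_TABLE)
-- ===== Notes on version B (the rewrite author's own statement) =====
-- stated objective: simpler
-- what changed: Replaces split-on-'/' + per-word chained .replace loop + '_'.join by stripping one leading '/' and a single translate pass over the characters with a prebuilt table.
import Mathlib
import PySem

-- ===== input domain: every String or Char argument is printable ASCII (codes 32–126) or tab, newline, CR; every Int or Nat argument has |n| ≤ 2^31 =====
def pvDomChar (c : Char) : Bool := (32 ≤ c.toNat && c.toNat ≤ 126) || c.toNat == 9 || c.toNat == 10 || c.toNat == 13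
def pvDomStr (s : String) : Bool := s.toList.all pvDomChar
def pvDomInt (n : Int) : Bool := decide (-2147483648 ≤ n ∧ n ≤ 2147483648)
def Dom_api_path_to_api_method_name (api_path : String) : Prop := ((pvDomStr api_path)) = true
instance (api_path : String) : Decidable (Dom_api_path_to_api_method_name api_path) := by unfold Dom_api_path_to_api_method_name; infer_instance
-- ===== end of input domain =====

-- B replaces A's split-on-'/' + per-word chained .replace loop + '_'.join by one
-- leading-slash strip and a single character-translation pass (objective: simpler).

-- ===== PORT A =====
-- per-word body of A's loop: j.replace('-','_').replace('{','').replace('}','').replace('.','')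
def pvRepChain (j : List Char) : List Char :=
  PySem.Chars.replace (PySem.Chars.replace (PySem.Chars.replace
    (PySem.Chars.replace j ['-'] ['_']) ['{'] []) ['}'] []) ['.'] []

-- A's inner helper canonical_words_method_name (list-of-chars side, exact)
def pvCanonicalWords (i : List (List Char)) : List Char :=
  let r := i.foldl (fun r j => r ++ [pvRepChain j]) []
  PySem.Chars.join ['_'] r

def api_path_to_api_method_name (api_path : String) : String :=
  let split_vec := PySem.Chars.splitOn api_path.toList ['/']
  let split_vec := if split_vec.head? = some [] then PySem.List.slice split_vec (some 1) none else split_vec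
  String.ofList (pvCanonicalWords split_vec)

-- ===== PORT B =====
-- the translation table: '-'→'_', '/'→'_', '{','}','.' deleted, everything else kept
def pvTrans (c : Char) : Option Char :=
  if c = '-' then some '_'
  else if c = '/' then some '_'
  else if c = '{' then none
  else if c = '}' then none
  else if c = '.' then none
  else some c

def api_path_to_api_method_name_alt (api_path : String) : String :=
  let s := api_path.toList
  let s := if PySem.Chars.startswith s ['/'] then s.drop 1 else s
  String.ofList (s.filterMap pvTrans)

-- ===== PRECONDITION & SPEC =====
def Spec_api_path_to_api_method_name (api_path : String) (out : String) : Prop := out = api_path_to_api_method_name_alt api_path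
instance (api_path : String) (out : String) : Decidable (Spec_api_path_to_api_method_name api_path out) := by unfold Spec_api_path_to_api_method_name; infer_instance

-- ===== CLAIM (what is proved, stated in full; the proofs are below) =====
def Claim_equal_api_path_to_api_method_name : Prop := ∀ (api_path : String), Dom_api_path_to_api_method_name api_path → Spec_api_path_to_api_method_name api_path (api_path_to_api_method_name api_path)

-- ===== LEMMAS AND PROOFS =====

-- reference splitter on a single-char separator '/'
def pvSplitc : List Char → List (List Char)
  | [] => [[]]
  | c :: t =>
    if c = '/' then [] :: pvSplitc t
    else match pvSplitc t with
      | [] => [[c]]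
      | w :: ws => (c :: w) :: ws

theorem pvSplitc_ne_nil (l : List Char) : pvSplitc l ≠ [] := by
  cases l with
  | nil => simp [pvSplitc]
  | cons c t =>
    simp only [pvSplitc]
    split
    · simp
    · split <;> simp

theorem pvSplitOn_go_eq (l : List Char) : ∀ (fuel : Nat) (cur : List Char) (acc : List (List Char)),
    l.length ≤ fuel →
    PySem.Chars.splitOn.go ['/'] fuel l cur.reverse acc =
      acc.reverse ++ (match pvSplitc l with
        | [] => []
        | w :: ws => (cur ++ w) :: ws) := by
  induction l with
  | nil =>
    intro fuel cur acc _
    cases fuel <;> simp [PySem.Chars.splitOn.go, pvSplitc]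
  | cons c t ih =>
    intro fuel cur acc hf
    cases fuel with
    | zero => simp at hf
    | succ fuel =>
      simp only [List.length_cons, Nat.succ_le_succ_iff] at hf
      by_cases hc : c = '/'
      · subst hc
        have : List.isPrefixOf ['/'] ('/' :: t) = true := by simp [List.isPrefixOf]
        simp only [PySem.Chars.splitOn.go, this, if_pos, List.length_cons,
          List.length_nil, List.drop_succ_cons, List.drop_zero, List.reverse_reverse]
        have h2 := ih fuel [] (cur :: acc) hf
        simp only [List.reverse_nil] at h2
        rw [h2]
        obtain ⟨w, ws, hw⟩ := List.exists_cons_of_ne_nil (pvSplitc_ne_nil t)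
        simp [pvSplitc, hw]
      · have : List.isPrefixOf ['/'] (c :: t) = false := by
          simp [List.isPrefixOf]; exact fun h => absurd h.symm hc
        simp only [PySem.Chars.splitOn.go, this, Bool.false_eq_true, if_false]
        have h2 := ih fuel (cur ++ [c]) acc hf
        simp only [List.reverse_append, List.reverse_cons, List.reverse_nil,
          List.nil_append, List.singleton_append] at h2 ⊢
        rw [h2]
        obtain ⟨w, ws, hw⟩ := List.exists_cons_of_ne_nil (pvSplitc_ne_nil t)
        simp [pvSplitc, hc, hw]

theorem pvSplitOn_eq (l : List Char) : PySem.Chars.splitOn l ['/'] = pvSplitc l := by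
  have h := pvSplitOn_go_eq l (l.length + 1) [] [] (by omega)
  simp only [List.reverse_nil] at h
  unfold PySem.Chars.splitOn
  rw [h]
  obtain ⟨w, ws, hw⟩ := List.exists_cons_of_ne_nil (pvSplitc_ne_nil l)
  simp [hw]

-- single-char replace is a flatMap
def pvSub (o : Char) (new : List Char) (c : Char) : List Char :=
  if c = o then new else [c]

theorem pvReplace_go_eq (o : Char) (new : List Char) (l : List Char) :
    ∀ (fuel : Nat) (acc : List Char), l.length ≤ fuel →
    PySem.Chars.replace.go [o] new fuel l acc =
      acc.reverse ++ l.flatMap (pvSub o new) := by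
  induction l with
  | nil =>
    intro fuel acc _
    cases fuel <;> simp [PySem.Chars.replace.go]
  | cons c t ih =>
    intro fuel acc hf
    cases fuel with
    | zero => simp at hf
    | succ fuel =>
      simp only [List.length_cons, Nat.succ_le_succ_iff] at hf
      by_cases hc : c = o
      · subst hc
        have : List.isPrefixOf [c] (c :: t) = true := by simp [List.isPrefixOf]
        simp only [PySem.Chars.replace.go, this, if_pos, List.length_cons,
          List.length_nil, List.drop_succ_cons, List.drop_zero]
        rw [ih fuel (new.reverse ++ acc) hf]
        simp [pvSub, List.flatMap_cons]
      · have : List.isPrefixOf [o] (c :: t) = false := by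
          simp [List.isPrefixOf]; exact fun h => absurd h.symm hc
        simp only [PySem.Chars.replace.go, this, Bool.false_eq_true, if_false]
        rw [ih fuel (c :: acc) hf]
        simp [pvSub, hc, List.flatMap_cons]

theorem pvReplace_eq (o : Char) (new l : List Char) :
    PySem.Chars.replace l [o] new = l.flatMap (pvSub o new) := by
  unfold PySem.Chars.replace
  simp only [List.isEmpty_cons, Bool.false_eq_true, if_false]
  have h := pvReplace_go_eq o new l l.length [] (le_refl _)
  simpa using h

-- the word transformation used inside words (no '/'), as a filterMap
def pvTransW (c : Char) : Option Char :=
  if c = '-' then some '_'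
  else if c = '{' then none
  else if c = '}' then none
  else if c = '.' then none
  else some c

theorem pvRepChain_eq (w : List Char) : pvRepChain w = w.filterMap pvTransW := by
  unfold pvRepChain
  simp only [pvReplace_eq]
  induction w with
  | nil => simp
  | cons c t ih =>
    simp only [List.flatMap_cons, List.flatMap_append, List.filterMap_cons] at ih ⊢
    rw [ih]
    by_cases h1 : c = '-'
    · simp [pvSub, pvTransW, h1]
    · by_cases h2 : c = '{'
      · simp [pvSub, pvTransW, h1, h2]
      · by_cases h3 : c = '}'
        · simp [pvSub, pvTransW, h1, h2, h3]
        · by_cases h4 : c = '.'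
          · simp [pvSub, pvTransW, h1, h2, h3, h4]
          · simp [pvSub, pvTransW, h1, h2, h3, h4]

theorem pvFoldl_map (i : List (List Char)) : ∀ (r : List (List Char)),
    i.foldl (fun r j => r ++ [pvRepChain j]) r = r ++ i.map pvRepChain := by
  induction i with
  | nil => simp
  | cons a t ih => intro r; simp [List.foldl_cons, ih]

-- the heart: '_'.join of the transformed words of the split equals one filterMap pass
theorem pvJoin_split (l : List Char) :
    PySem.Chars.join ['_'] ((pvSplitc l).map (fun w => w.filterMap pvTransW)) =
      l.filterMap pvTrans := by
  induction l with
  | nil => simp [pvSplitc, PySem.Chars.join, List.intercalate]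
  | cons c t ih =>
    by_cases hc : c = '/'
    · subst hc
      obtain ⟨w, ws, hw⟩ := List.exists_cons_of_ne_nil (pvSplitc_ne_nil t)
      simp only [pvSplitc, if_pos rfl, List.map_cons, List.filterMap_nil]
      rw [hw] at ih ⊢
      simp only [PySem.Chars.join, List.intercalate, List.map_cons] at ih ⊢
      simp only [List.intersperse, List.flatten_cons, List.nil_append,
        List.filterMap_cons] at ih ⊢
      simp [pvTrans, ih]
    · obtain ⟨w, ws, hw⟩ := List.exists_cons_of_ne_nil (pvSplitc_ne_nil t)
      simp only [pvSplitc, hc, if_false, hw]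
      rw [hw] at ih
      simp only [PySem.Chars.join, List.intercalate, List.map_cons] at ih ⊢
      cases ws with
      | nil =>
        simp only [List.map_nil, List.intersperse, List.flatten_cons,
          List.flatten_nil, List.append_nil, List.filterMap_cons] at ih ⊢
        rw [ih]
        by_cases h1 : c = '-' <;> by_cases h2 : c = '{' <;> by_cases h3 : c = '}' <;>
          by_cases h4 : c = '.' <;> simp_all [pvTrans, pvTransW]
      | cons w2 ws2 =>
        simp only [List.map_cons, List.intersperse, List.flatten_cons,
          List.filterMap_cons] at ih ⊢
        by_cases h1 : c = '-' <;> by_cases h2 : c = '{' <;> by_cases h3 : c = '}' <;>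
          by_cases h4 : c = '.' <;> simp_all [pvTrans, pvTransW, List.append_assoc]

-- ===== VERDICT (by name: the statement is the Claim_ definition above) =====
theorem api_path_to_api_method_name_spec : Claim_equal_api_path_to_api_method_name := by
  intro api_path _
  unfold Spec_api_path_to_api_method_name api_path_to_api_method_name api_path_to_api_method_name_alt
  simp only [pvSplitOn_eq]
  congr 1
  unfold pvCanonicalWords
  rw [pvFoldl_map]
  simp only [List.nil_append, List.map_map]
  have hmap : (List.map pvRepChain : List (List Char) → _) =
      List.map (fun w => w.filterMap pvTransW) := by
    funext i; exact List.map_congr_left (fun w _ => pvRepChain_eq w)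
  cases hl : api_path.toList with
  | nil => simp [pvSplitc, PySem.Chars.startswith, PySem.Chars.join, List.intercalate, PySem.List.slice]
  | cons c t =>
    by_cases hc : c = '/'
    · subst hc
      have hs : PySem.Chars.startswith ('/' :: t) ['/'] = true := by
        simp [PySem.Chars.startswith, List.isPrefixOf]
      simp only [pvSplitc, if_pos rfl, List.head?_cons, hs, if_pos, List.drop_one,
        List.tail_cons]
      have hslice : PySem.List.slice ([] :: pvSplitc t) (some (1:Int)) none = pvSplitc t := by
        simp [PySem.List.slice]
      rw [hslice, hmap]
      exact pvJoin_split t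
    · have hs : PySem.Chars.startswith (c :: t) ['/'] = false := by
        simp [PySem.Chars.startswith, List.isPrefixOf]
        exact fun h => absurd h.symm hc
      obtain ⟨w, ws, hw⟩ := List.exists_cons_of_ne_nil (pvSplitc_ne_nil t)
      have hhead : (pvSplitc (c :: t)).head? ≠ some [] := by
        simp [pvSplitc, hc, hw]
      simp only [hs, Bool.false_eq_true, if_false, if_neg hhead]
      rw [hmap]
      exact pvJoin_split (c :: t)
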